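-- pv_equiv track=rewrite | github.com/sasdf/ctf | writeup/2018/hxp/crypto/blinder/_files/solve.py | NAF
-- ===== SOURCE A (Python) =====
-- def NAF(k):
--     z = []
--     while k > 0:
--         if k & 1:
--             z.append(2 - k % 4)
--         else:
--             z.append(0)
--         k = (k - z[-1]) // 2
--     return tuple(z[::-1])
-- ===== SOURCE B (Python) =====
-- def NAF(k):
--     # Two staged passes: expand k into its binary digits (low bit first), then run a
--     # carry automaton with one-bit lookahead over that digit list to emit NAF digits.
--     bits = []
--     while k > 0:
--         bits.append(k % 2)
--         k //= 2
--     out = []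
--     carry = 0
--     n = len(bits)
--     i = 0
--     while i < n:
--         v = bits[i] + carry
--         if v % 2 == 0:
--             out.append(0)
--             carry = v // 2
--         else:
--             nxt = bits[i + 1] if i + 1 < n else 0
--             out.append(1 - 2 * nxt)
--             carry = nxt
--         i += 1
--     if carry:
--         out.append(1)
--     return tuple(reversed(out))
-- ===== Notes on version B (the rewrite author's own statement) =====
-- stated objective: alternative
-- what changed: A emits each digit from the current remainder inside a single divmod loop and reverses at the end; B first expands k into its binary digit list and then runs a carry automaton with one-bit lookahead over that list to produce the NAF digits.
import Mathlib
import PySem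

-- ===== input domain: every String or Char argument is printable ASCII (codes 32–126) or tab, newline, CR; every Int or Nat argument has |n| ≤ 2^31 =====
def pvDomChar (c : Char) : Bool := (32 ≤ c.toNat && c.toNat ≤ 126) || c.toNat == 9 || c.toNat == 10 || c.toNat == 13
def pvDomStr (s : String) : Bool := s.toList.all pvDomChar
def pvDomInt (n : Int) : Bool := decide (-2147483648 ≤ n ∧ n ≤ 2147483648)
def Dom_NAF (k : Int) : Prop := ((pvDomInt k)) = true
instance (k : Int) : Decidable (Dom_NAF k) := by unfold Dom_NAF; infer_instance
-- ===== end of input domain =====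

-- B replaces A's divmod loop by a binary-expansion pass followed by a carry automaton
-- with one-bit lookahead (objective: alternative, same asymptotic cost).

-- ===== PORT A =====
-- termination helper for A's loop variable (cited by name in decreasing_by)
theorem NAF_go_dec (k d : Int) (hk : 0 < k)
    (hd : d = if PySem.Int.band k 1 ≠ 0 then 2 - PySem.Int.mod k 4 else 0) :
    (PySem.Int.floordiv (k - d) 2).toNat < k.toNat := by
  rw [PySem.Int.floordiv_eq_ediv_of_pos (by omega)]
  rw [PySem.Int.band_one, PySem.Int.mod_eq_emod_of_pos (b := 2) (by omega)] at hd
  rw [PySem.Int.mod_eq_emod_of_pos (b := 4) (by omega)] at hd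
  by_cases h : k % 2 = 0 <;> simp [h] at hd <;> omega

def NAF_go (k : Int) (z : List Int) : List Int :=
  if 0 < k then
    let d : Int := if PySem.Int.band k 1 ≠ 0 then 2 - PySem.Int.mod k 4 else 0
    NAF_go (PySem.Int.floordiv (k - d) 2) (z ++ [d])
  else (PySem.List.slice? z none none (-1)).getD []   -- z[::-1]
termination_by k.toNat
decreasing_by exact NAF_go_dec k _ (by omega) rfl

def NAF (k : Int) : List Int := NAF_go k []

-- ===== PORT B =====
theorem NAF_half_dec (k : Int) (hk : 0 < k) : (PySem.Int.floordiv k 2).toNat < k.toNat := by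
  rw [PySem.Int.floordiv_eq_ediv_of_pos (by omega)]; omega

-- first pass: binary digits of k, low bit first
def NAF_bits (k : Int) : List Int :=
  if 0 < k then PySem.Int.mod k 2 :: NAF_bits (PySem.Int.floordiv k 2) else []
termination_by k.toNat
decreasing_by exact NAF_half_dec k (by omega)

-- second pass: carry automaton with one-bit lookahead; the trailing 'if carry: append 1'
-- of Source B is the base case
def NAF_auto : List Int → Int → List Int
  | [], carry => if carry ≠ 0 then [1] else []
  | b :: rest, carry =>
    let v := b + carry
    if PySem.Int.mod v 2 = 0 then 0 :: NAF_auto rest (PySem.Int.floordiv v 2)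
    else (1 - 2 * rest.headD 0) :: NAF_auto rest (rest.headD 0)

def NAF_alt (k : Int) : List Int := (NAF_auto (NAF_bits k) 0).reverse

-- ===== PRECONDITION & SPEC =====
def Spec_NAF (k : Int) (out : List Int) : Prop := out = NAF_alt k
instance (k : Int) (out : List Int) : Decidable (Spec_NAF k out) := by unfold Spec_NAF; infer_instance

-- ===== CLAIM (what is proved, stated in full; the proofs are below) =====
def Claim_equal_NAF : Prop := ∀ (k : Int), Dom_NAF k → Spec_NAF k (NAF k)

-- ===== LEMMAS AND PROOFS =====

-- ghost: A's low-order-first digit stream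
def Ldig (k : Int) : List Int :=
  if 0 < k then
    let d : Int := if PySem.Int.band k 1 ≠ 0 then 2 - PySem.Int.mod k 4 else 0
    d :: Ldig (PySem.Int.floordiv (k - d) 2)
  else []
termination_by k.toNat
decreasing_by exact NAF_go_dec k _ (by omega) rfl

theorem Ldig_nonpos (m : Int) (hm : ¬ 0 < m) : Ldig m = [] := by
  rw [Ldig, if_neg hm]

theorem Ldig_even (m : Int) (hm : 0 < m) (he : m % 2 = 0) : Ldig m = 0 :: Ldig (m / 2) := by
  have hb1 : PySem.Int.band m 1 = m % 2 := by
    rw [PySem.Int.band_one]; exact PySem.Int.mod_eq_emod_of_pos (by omega)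
  rw [Ldig, if_pos hm]
  simp [hb1, he]

theorem Ldig_odd (m : Int) (hm : 0 < m) (ho : m % 2 = 1) :
    Ldig m = (2 - m % 4) :: Ldig ((m - (2 - m % 4)) / 2) := by
  have hb1 : PySem.Int.band m 1 = m % 2 := by
    rw [PySem.Int.band_one]; exact PySem.Int.mod_eq_emod_of_pos (by omega)
  rw [Ldig, if_pos hm]
  simp [hb1, ho]

theorem NAF_go_eq (k : Int) (z : List Int) : NAF_go k z = (z ++ Ldig k).reverse := by
  rw [NAF_go, Ldig]
  split
  · rw [NAF_go_eq]
    simp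
  · simp [PySem.List.slice?_none_none_neg_one]
termination_by k.toNat
decreasing_by exact NAF_go_dec k _ (by omega) rfl

-- value of a low-order-first binary digit list
def bval : List Int → Int
  | [] => 0
  | b :: bs => b + 2 * bval bs

theorem bval_nonneg (bs : List Int) (hb : ∀ b ∈ bs, b = 0 ∨ b = 1) : 0 ≤ bval bs := by
  induction bs with
  | nil => simp [bval]
  | cons b rest ih =>
    have h1 := ih (fun x hx => hb x (List.mem_cons_of_mem _ hx))
    have h2 := hb b (by simp)
    simp only [bval]; omega

theorem bval_pos (bs : List Int) (hb : ∀ b ∈ bs, b = 0 ∨ b = 1)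
    (hl : bs.getLast? = some 1) : 0 < bval bs := by
  induction bs with
  | nil => simp at hl
  | cons b rest ih =>
    cases rest with
    | nil => simp at hl; simp [bval, hl]
    | cons c r =>
      have h1 : 0 < bval (c :: r) := by
        apply ih
        · intro x hx; exact hb x (List.mem_cons_of_mem _ hx)
        · simpa using hl
      have h2 := hb b (by simp)
      simp only [bval] at h1 ⊢; omega

theorem bval_mod2 (bs : List Int) (hb : ∀ b ∈ bs, b = 0 ∨ b = 1) :
    bval bs % 2 = bs.headD 0 := by
  cases bs with
  | nil => simp [bval]
  | cons b rest =>
    have := hb b (by simp)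
    simp only [bval, List.headD_cons]
    omega

-- the automaton run on a bit list computes A's digit stream of its value (+ carry)
theorem auto_eq (bs : List Int) (c : Int) (hb : ∀ b ∈ bs, b = 0 ∨ b = 1)
    (hl : bs.getLast? = some 1 ∨ bs = []) (hc : c = 0 ∨ c = 1) :
    NAF_auto bs c = Ldig (bval bs + c) := by
  induction bs generalizing c with
  | nil =>
    rcases hc with rfl | rfl
    · have h0 : Ldig 0 = [] := Ldig_nonpos 0 (by omega)
      simp [NAF_auto, bval, h0]
    · have h1 : Ldig 1 = [1] := by
        rw [Ldig_odd 1 (by omega) (by omega)]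
        norm_num
        exact Ldig_nonpos 0 (by omega)
      simp [NAF_auto, bval, h1]
  | cons b rest ih =>
    have hbr : ∀ x ∈ rest, x = 0 ∨ x = 1 := fun x hx => hb x (List.mem_cons_of_mem _ hx)
    have hb0 : b = 0 ∨ b = 1 := hb b (by simp)
    have hnn : 0 ≤ bval rest := bval_nonneg rest hbr
    have hhead : rest.headD 0 = 0 ∨ rest.headD 0 = 1 := by
      cases rest with
      | nil => left; rfl
      | cons c' r' => simpa using hbr c' (by simp)
    have hm2 := bval_mod2 rest hbr
    have h01 : (rest = [] ∧ b = 1) ∨ 0 < bval rest := by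
      rcases hl with hl | hl
      · cases rest with
        | nil => left; simp at hl; exact ⟨rfl, hl⟩
        | cons c' r' =>
          right
          apply bval_pos _ hbr
          simpa using hl
      · simp at hl
    have hlast : rest.getLast? = some 1 ∨ rest = [] := by
      cases rest with
      | nil => right; rfl
      | cons c' r' =>
        left
        rcases hl with hl | hl
        · simpa using hl
        · simp at hl
    have hb2 : ∀ a : Int, PySem.Int.mod a 2 = a % 2 := fun a =>
      PySem.Int.mod_eq_emod_of_pos (by omega)
    have hd2 : ∀ a : Int, PySem.Int.floordiv a 2 = a / 2 := fun a =>
      PySem.Int.floordiv_eq_ediv_of_pos (by omega)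
    simp only [NAF_auto, hb2, hd2]
    by_cases hv : (b + c) % 2 = 0
    · -- even step: digit 0, carry (b+c)/2
      rw [if_pos hv]
      have hcd : (b + c) / 2 = 0 ∨ (b + c) / 2 = 1 := by omega
      rw [ih ((b + c) / 2) hbr hlast hcd]
      have hpos : 0 < bval (b :: rest) + c := by
        rcases h01 with ⟨hr, hb1⟩ | hq
        · subst hr; simp only [bval] at *; omega
        · simp only [bval]; omega
      rw [Ldig_even _ hpos (by simp only [bval]; omega)]
      have harg : bval rest + (b + c) / 2 = (bval (b :: rest) + c) / 2 := by
        simp only [bval]; omega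
      rw [harg]
    · -- odd step: b + c = 1; digit 1 - 2*lookahead
      have hbc : b + c = 1 := by rcases hb0 with rfl | rfl <;> rcases hc with rfl | rfl <;> omega
      rw [if_neg hv]
      rw [ih (rest.headD 0) hbr hlast hhead]
      have hpos : 0 < bval (b :: rest) + c := by simp only [bval]; omega
      rw [Ldig_odd _ hpos (by simp only [bval]; omega)]
      have h4 : (bval (b :: rest) + c) % 4 = 1 + 2 * rest.headD 0 := by
        simp only [bval]
        rcases hhead with hh | hh <;> rw [hh] at hm2 <;> omega
      rw [h4]
      congr 1
      · omega
      · congr 1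
        simp only [bval]
        rcases hhead with hh | hh <;> rw [hh] at hm2 <;> omega

theorem bits_are_bits (k : Int) : ∀ b ∈ NAF_bits k, b = 0 ∨ b = 1 := by
  intro b hb
  rw [NAF_bits] at hb
  split at hb
  · rcases List.mem_cons.1 hb with rfl | hb'
    · rw [PySem.Int.mod_eq_emod_of_pos (show (0:Int) < 2 by omega)]; omega
    · exact bits_are_bits _ b hb'
  · simp at hb
termination_by k.toNat
decreasing_by exact NAF_half_dec k (by omega)

theorem bits_val (k : Int) (hk : 0 < k) : bval (NAF_bits k) = k := by
  rw [NAF_bits, if_pos hk]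
  have hfd : PySem.Int.floordiv k 2 = k / 2 := PySem.Int.floordiv_eq_ediv_of_pos (by omega)
  have hmd : PySem.Int.mod k 2 = k % 2 := PySem.Int.mod_eq_emod_of_pos (by omega)
  by_cases h2 : 0 < PySem.Int.floordiv k 2
  · have ih := bits_val (PySem.Int.floordiv k 2) h2
    rw [hfd] at ih h2
    simp only [bval, hfd, hmd, ih]
    omega
  · have hnil : NAF_bits (PySem.Int.floordiv k 2) = [] := by rw [NAF_bits, if_neg h2]
    rw [hnil]
    rw [hfd] at h2
    simp only [bval, hmd]
    omega
termination_by k.toNat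
decreasing_by exact NAF_half_dec k (by omega)

theorem bits_last (k : Int) (hk : 0 < k) : (NAF_bits k).getLast? = some 1 := by
  rw [NAF_bits, if_pos hk]
  by_cases h2 : 0 < PySem.Int.floordiv k 2
  · have ih := bits_last (PySem.Int.floordiv k 2) h2
    rw [NAF_bits, if_pos h2] at ih ⊢
    rw [List.getLast?_cons_cons]
    exact ih
  · rw [NAF_bits, if_neg h2]
    have hfd : PySem.Int.floordiv k 2 = k / 2 := PySem.Int.floordiv_eq_ediv_of_pos (by omega)
    rw [hfd] at h2
    have hk1 : k = 1 := by omega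
    subst hk1
    rw [PySem.Int.mod_eq_emod_of_pos (show (0:Int) < 2 by omega)]
    rfl
termination_by k.toNat
decreasing_by exact NAF_half_dec k (by omega)

-- ===== VERDICT (by name: the statement is the Claim_ definition above) =====
theorem NAF_spec : Claim_equal_NAF := by
  intro k _
  unfold Spec_NAF NAF NAF_alt
  rw [NAF_go_eq]
  by_cases hk : 0 < k
  · rw [auto_eq (NAF_bits k) 0 (bits_are_bits k) (Or.inl (bits_last k hk)) (Or.inl rfl)]
    rw [bits_val k hk]
    simp
  · rw [NAF_bits, if_neg hk]
    simp only [NAF_auto]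
    rw [Ldig_nonpos k hk]
    simp
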